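-- pv_equiv track=rewrite | github.com/Shaxens/TicTacToe-Project-2022 | tictactoe.py | espace_valide
-- ===== SOURCE A (Python) =====
-- def in_espace(char):
--     if char == " ":
--         return True
--     else:
--         return False
--
-- def in_tout_caractere(char):
--     if char != " " :
--         return True
--     else:
--         return False
--
-- def espace_valide(char):
--     char_before = 0
--     space_between = 0
--     char_after = 0
--     for i in range(len(char)):
--         if in_tout_caractere(char[i]) == True and char_before == 0:
--             char_before += 1
--         elif char_before + space_between == 1 and in_espace(char[i]):
--             space_between += 1
--         elif char_before + space_between + char_after == 2 and in_tout_caractere(char[i]):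
--             char_after += 1
--     if char_before + space_between + char_after == 3:
--         return False
--     else:
--         return True
-- ===== SOURCE B (Python) =====
-- def espace_valide(char):
--     # valid iff no space remains once leading/trailing spaces are stripped
--     return " " not in char.strip(" ")
-- ===== Notes on version B (the rewrite author's own statement) =====
-- stated objective: simpler
-- what changed: Replaced the per-character three-counter state machine by a single expression: a char-space-char pattern exists iff a space survives stripping leading and trailing spaces, so B tests space membership of the stripped string.
import Mathlib
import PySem

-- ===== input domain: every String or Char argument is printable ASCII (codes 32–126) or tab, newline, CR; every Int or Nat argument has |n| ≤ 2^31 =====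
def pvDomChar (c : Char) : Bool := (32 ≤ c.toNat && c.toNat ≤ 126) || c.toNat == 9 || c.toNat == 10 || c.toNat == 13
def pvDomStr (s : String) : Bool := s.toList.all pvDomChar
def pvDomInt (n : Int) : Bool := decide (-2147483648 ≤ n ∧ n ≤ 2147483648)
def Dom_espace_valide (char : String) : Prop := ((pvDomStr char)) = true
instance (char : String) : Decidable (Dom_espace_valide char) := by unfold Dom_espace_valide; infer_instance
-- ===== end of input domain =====

-- B replaces A's three-counter state machine by one line: a char-space-char pattern exists iff a space survives stripping leading/trailing spaces.

-- ===== PORT A =====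
def in_espace (c : Char) : Bool :=
  if c == ' ' then true else false

def in_tout_caractere (c : Char) : Bool :=
  if c != ' ' then true else false

def espaceStep (st : Int × Int × Int) (c : Char) : Int × Int × Int :=
  if in_tout_caractere c == true && st.1 == 0 then (st.1 + 1, st.2.1, st.2.2)
  else if st.1 + st.2.1 == 1 && in_espace c then (st.1, st.2.1 + 1, st.2.2)
  else if st.1 + st.2.1 + st.2.2 == 2 && in_tout_caractere c then (st.1, st.2.1, st.2.2 + 1)
  else st

def espace_valide (char : String) : Bool :=
  let st := char.toList.foldl espaceStep (0, 0, 0)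
  if st.1 + st.2.1 + st.2.2 == 3 then false else true

-- ===== PORT B =====
def espace_valide_alt (char : String) : Bool :=
  !(PySem.Str.isIn " " (PySem.Str.stripChars char " "))

-- ===== PRECONDITION & SPEC =====
def Spec_espace_valide (char : String) (out : Bool) : Prop := out = espace_valide_alt char
instance (char : String) (out : Bool) : Decidable (Spec_espace_valide char out) := by unfold Spec_espace_valide; infer_instance

-- ===== CLAIM (what is proved, stated in full; the proofs are below) =====
def Claim_equal_espace_valide : Prop := ∀ (char : String), Dom_espace_valide char → Spec_espace_valide char (espace_valide char)

-- ===== LEMMAS AND PROOFS =====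

-- trailing-space strip, used to describe what the loop has seen
def stripTrail (l : List Char) : List Char :=
  (l.reverse.dropWhile (fun c => [' '].contains c)).reverse

theorem contains_space_false (c : Char) (h : c ≠ ' ') : ([' '].contains c) = false := by
  simp; exact h

theorem stripTrail_cons_nonspace (c : Char) (r : List Char) (h : c ≠ ' ') :
    stripTrail (c :: r) = c :: stripTrail r := by
  unfold stripTrail
  rw [List.reverse_cons, List.dropWhile_append]
  cases h' : List.dropWhile (fun c => [' '].contains c) r.reverse with
  | nil =>
    simp [List.dropWhile_cons]
    exact h
  | cons x xs => simp

theorem mem_stripTrail_cons_space (r : List Char) :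
    (' ' ∈ stripTrail (' ' :: r)) ↔ r.any (fun c => c ≠ ' ') = true := by
  unfold stripTrail
  rw [List.reverse_cons, List.dropWhile_append]
  cases h' : List.dropWhile (fun c => [' '].contains c) r.reverse with
  | nil =>
    rw [List.dropWhile_eq_nil_iff] at h'
    simp only [List.isEmpty_nil, if_true, List.dropWhile_cons]
    norm_num
    intro x hx
    have := h' x (List.mem_reverse.mpr hx)
    simpa using this
  | cons x xs =>
    simp only [List.isEmpty_cons]
    constructor
    · intro _
      rw [List.any_eq_true]
      refine ⟨x, ?_, ?_⟩
      · exact List.mem_reverse.mp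
          ((List.dropWhile_sublist (fun c => [' '].contains c) (l := r.reverse)).subset
            (by rw [h']; exact List.mem_cons_self))
      · have hx := List.head?_dropWhile_not (fun c => [' '].contains c) r.reverse
        rw [h'] at hx
        simpa using hx
    · intro _
      simp

theorem foldl_from_111 (r : List Char) :
    r.foldl espaceStep (1, 1, 1) = (1, 1, 1) := by
  induction r with
  | nil => rfl
  | cons c r ih =>
    have hstep : espaceStep (1, 1, 1) c = (1, 1, 1) := by
      simp [espaceStep, in_espace, in_tout_caractere]
    simpa [hstep] using ih

theorem foldl_from_110 (r : List Char) :
    r.foldl espaceStep (1, 1, 0) =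
      if r.any (fun c => c ≠ ' ') then (1, 1, 1) else (1, 1, 0) := by
  induction r with
  | nil => rfl
  | cons c r ih =>
    by_cases hc : c = ' '
    · subst hc
      have hstep : espaceStep (1, 1, 0) ' ' = (1, 1, 0) := by
        simp [espaceStep, in_espace, in_tout_caractere]
      simp [hstep, ih]
    · have hstep : espaceStep (1, 1, 0) c = (1, 1, 1) := by
        simp [espaceStep, in_espace, in_tout_caractere, hc]
      simp [hstep, foldl_from_111, hc]

theorem foldl_from_100 (r : List Char) :
    r.foldl espaceStep (1, 0, 0) =
      if ' ' ∈ stripTrail r then (1, 1, 1)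
      else if ' ' ∈ r then (1, 1, 0) else (1, 0, 0) := by
  induction r with
  | nil => rfl
  | cons c r ih =>
    by_cases hc : c = ' '
    · subst hc
      have hstep : espaceStep (1, 0, 0) ' ' = (1, 1, 0) := by
        simp [espaceStep, in_espace, in_tout_caractere]
      rw [List.foldl_cons, hstep, foldl_from_110]
      by_cases ha : r.any (fun c => c ≠ ' ') = true
      · rw [if_pos ha, if_pos ((mem_stripTrail_cons_space r).mpr ha)]
      · rw [if_neg ha, if_neg (fun h => ha ((mem_stripTrail_cons_space r).mp h)),
            if_pos List.mem_cons_self]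
    · have hstep : espaceStep (1, 0, 0) c = (1, 0, 0) := by
        simp [espaceStep, in_espace, in_tout_caractere, hc]
      rw [List.foldl_cons, hstep, ih, stripTrail_cons_nonspace c r hc]
      have h1 : (' ' ∈ c :: stripTrail r) ↔ ' ' ∈ stripTrail r := by
        constructor
        · intro h; rcases List.mem_cons.mp h with h | h
          · exact absurd h.symm hc
          · exact h
        · exact fun h => List.mem_cons_of_mem _ h
      have h2 : (' ' ∈ c :: r) ↔ ' ' ∈ r := by
        constructor
        · intro h; rcases List.mem_cons.mp h with h | h
          · exact absurd h.symm hc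
          · exact h
        · exact fun h => List.mem_cons_of_mem _ h
      by_cases hs : ' ' ∈ stripTrail r
      · rw [if_pos hs, if_pos (h1.mpr hs)]
      · rw [if_neg hs, if_neg (fun h => hs (h1.mp h))]
        by_cases hr : ' ' ∈ r
        · rw [if_pos hr, if_pos (h2.mpr hr)]
        · rw [if_neg hr, if_neg (fun h => hr (h2.mp h))]

theorem foldl_from_000 (r : List Char) :
    r.foldl espaceStep (0, 0, 0) =
      if ' ' ∈ stripTrail (r.dropWhile (fun c => [' '].contains c)) then (1, 1, 1)
      else if ' ' ∈ r.dropWhile (fun c => [' '].contains c) then (1, 1, 0)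
      else if r.any (fun c => c ≠ ' ') then (1, 0, 0) else (0, 0, 0) := by
  induction r with
  | nil => rfl
  | cons c r ih =>
    by_cases hc : c = ' '
    · subst hc
      have hstep : espaceStep (0, 0, 0) ' ' = (0, 0, 0) := by
        simp [espaceStep, in_espace, in_tout_caractere]
      rw [List.foldl_cons, hstep, ih]
      simp
    · have hstep : espaceStep (0, 0, 0) c = (1, 0, 0) := by
        simp [espaceStep, in_tout_caractere, hc]
      have hdw : (c :: r).dropWhile (fun c => [' '].contains c) = c :: r := by
        rw [List.dropWhile_cons, contains_space_false c hc]
        simp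
      rw [List.foldl_cons, hstep, foldl_from_100, hdw,
          stripTrail_cons_nonspace c r hc]
      have h1 : (' ' ∈ c :: stripTrail r) ↔ ' ' ∈ stripTrail r := by
        constructor
        · intro h; rcases List.mem_cons.mp h with h | h
          · exact absurd h.symm hc
          · exact h
        · exact fun h => List.mem_cons_of_mem _ h
      have h2 : (' ' ∈ c :: r) ↔ ' ' ∈ r := by
        constructor
        · intro h; rcases List.mem_cons.mp h with h | h
          · exact absurd h.symm hc
          · exact h
        · exact fun h => List.mem_cons_of_mem _ h
      have h3 : (c :: r).any (fun c => c ≠ ' ') = true := by simp [hc]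
      rw [h3, if_pos rfl]
      by_cases hs : ' ' ∈ stripTrail r
      · rw [if_pos hs, if_pos (h1.mpr hs)]
      · rw [if_neg hs, if_neg (fun h => hs (h1.mp h))]
        by_cases hr : ' ' ∈ r
        · rw [if_pos hr, if_pos (h2.mpr hr)]
        · rw [if_neg hr, if_neg (fun h => hr (h2.mp h))]

theorem toList_stripChars_space (char : String) :
    (PySem.Str.stripChars char " ").toList
      = stripTrail (char.toList.dropWhile (fun c => [' '].contains c)) := by
  rw [PySem.Str.toList_stripChars]
  rfl

theorem isIn_space_iff (char : String) :
    PySem.Str.isIn " " (PySem.Str.stripChars char " ") = true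
      ↔ ' ' ∈ stripTrail (char.toList.dropWhile (fun c => [' '].contains c)) := by
  rw [PySem.Str.isIn_iff_infix, toList_stripChars_space]
  exact List.singleton_infix_iff ' ' _

-- ===== VERDICT (by name: the statement is the Claim_ definition above) =====
theorem espace_valide_spec : Claim_equal_espace_valide := by
  intro char _
  unfold Spec_espace_valide espace_valide espace_valide_alt
  rw [foldl_from_000 char.toList]
  by_cases hs : ' ' ∈ stripTrail (char.toList.dropWhile (fun c => [' '].contains c))
  · rw [if_pos hs, ((isIn_space_iff char).mpr hs)]
    decide
  · rw [if_neg hs]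
    have hB : PySem.Str.isIn " " (PySem.Str.stripChars char " ") = false := by
      rcases Bool.eq_false_or_eq_true (PySem.Str.isIn " " (PySem.Str.stripChars char " ")) with h | h
      · exact absurd ((isIn_space_iff char).mp h) hs
      · exact h
    rw [hB]
    split_ifs <;> decide
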